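-- pv_equiv track=rewrite | github.com/BrianMills2718/llm_client | llm_client/agent/agent_contracts.py | _capability_state_snapshot
-- ===== SOURCE A (Python) =====
-- from dataclasses import dataclass, field
--
-- @dataclass(frozen=True)
-- class CapabilityRequirement:
--     """Normalized capability requirement for composability checks."""
--
--     kind: str
--     ref_type: str | None = None
--     namespace: str | None = None
--     bindings_hash: str | None = None
--
--     def to_dict(self) -> dict[str, str]:
--         payload: dict[str, str] = {"kind": self.kind}
--         if self.ref_type:
--             payload["ref_type"] = self.ref_type
--         if self.namespace:
--             payload["namespace"] = self.namespace
--         if self.bindings_hash: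
--             payload["bindings_hash"] = self.bindings_hash
--         return payload
--
--     def short_label(self) -> str:
--         suffix_parts: list[str] = []
--         if self.ref_type:
--             suffix_parts.append(f"ref_type={self.ref_type}")
--         if self.namespace:
--             suffix_parts.append(f"namespace={self.namespace}")
--         if self.bindings_hash:
--             suffix_parts.append(f"bindings_hash={self.bindings_hash[:12]}")
--         if not suffix_parts:
--             return self.kind
--         return f"{self.kind}[{', '.join(suffix_parts)}]"
--
-- def _capability_state_snapshot(
--     state: dict[str, set[tuple[str | None, str | None, str | None]]],
-- ) -> list[dict[str, str]]:
--     out: list[dict[str, str]] = []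
--     for kind in sorted(state):
--         entries = sorted(
--             state[kind],
--             key=lambda item: (
--                 item[0] or "",
--                 item[1] or "",
--                 item[2] or "",
--             ),
--         )
--         for ref_type, namespace, bindings_hash in entries:
--             req = CapabilityRequirement(
--                 kind=kind,
--                 ref_type=ref_type,
--                 namespace=namespace,
--                 bindings_hash=bindings_hash,
--             )
--             out.append(req.to_dict())
--     return out
-- ===== SOURCE B (Python) =====
-- def _capability_state_snapshot(state):
--     flat = [
--         (kind, ref_type, namespace, bindings_hash)
--         for kind, entries in state.items()
--         for ref_type, namespace, bindings_hash in entries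
--     ]
--     flat.sort(key=lambda t: (t[0], t[1] or "", t[2] or "", t[3] or ""))
--     out = []
--     for kind, ref_type, namespace, bindings_hash in flat:
--         row = {"kind": kind}
--         if ref_type:
--             row["ref_type"] = ref_type
--         if namespace:
--             row["namespace"] = namespace
--         if bindings_hash:
--             row["bindings_hash"] = bindings_hash
--         out.append(row)
--     return out
-- ===== Notes on version B (the rewrite author's own statement) =====
-- stated objective: simpler
-- what changed: Replaces A's two-level scheme (sort the kinds, then separately sort each kind's entry set and emit via a dataclass to_dict) with one flatten into (kind, ref_type, namespace, bindings_hash) tuples, one global stable sort on the 4-tuple key, and a single flat emission loop.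
import Mathlib
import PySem

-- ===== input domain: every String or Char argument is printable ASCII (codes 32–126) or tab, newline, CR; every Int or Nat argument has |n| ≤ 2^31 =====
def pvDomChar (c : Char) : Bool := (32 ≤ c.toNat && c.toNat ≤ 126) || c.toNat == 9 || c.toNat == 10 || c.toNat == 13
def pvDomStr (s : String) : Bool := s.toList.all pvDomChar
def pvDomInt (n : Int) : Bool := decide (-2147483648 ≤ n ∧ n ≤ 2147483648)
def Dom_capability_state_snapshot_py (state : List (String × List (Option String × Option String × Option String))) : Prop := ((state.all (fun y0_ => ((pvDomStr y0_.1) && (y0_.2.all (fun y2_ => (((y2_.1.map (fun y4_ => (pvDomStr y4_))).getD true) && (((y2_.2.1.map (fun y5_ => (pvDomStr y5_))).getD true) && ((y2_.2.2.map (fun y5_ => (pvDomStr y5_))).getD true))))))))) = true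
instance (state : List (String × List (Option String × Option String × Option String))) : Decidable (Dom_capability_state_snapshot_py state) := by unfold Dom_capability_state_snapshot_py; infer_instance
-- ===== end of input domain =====

-- B replaces A's nested per-kind sorting (sort kinds, then sort each kind's entry set) by one flatten,
-- one global sort on the (kind, ref_type or "", namespace or "", bindings_hash or "") tuple, and one flat
-- emission pass; objective: simpler (one sort, one loop).


-- ===== PORT A =====
-- CapabilityRequirement.to_dict: always "kind"; each optional field only when truthy (not None, not "")
def pvOptEntry (label : String) (o : Option String) : List (String × String) :=
  match o with
  | some s => if s = "" then [] else [(label, s)]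
  | none => []

def toDictA (kind : String) (e : Option String × Option String × Option String) : List (String × String) :=
  [("kind", kind)] ++ pvOptEntry "ref_type" e.1 ++ pvOptEntry "namespace" e.2.1
    ++ pvOptEntry "bindings_hash" e.2.2

-- inner sort key (item[0] or "", item[1] or "", item[2] or ""); Lex nesting = Python tuple comparison
def keyA (e : Option String × Option String × Option String) : List String :=
  [e.1.getD "", e.2.1.getD "", e.2.2.getD ""]

def capability_state_snapshot_py (state : List (String × List (Option String × Option String × Option String))) : List (List (String × String)) :=
  (PySem.List.sorted (state.map Prod.fst) (fun k => k)).foldl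
    (fun out kind =>
      (PySem.List.sorted ((PySem.Dict.mk state).getD kind []) keyA).foldl
        (fun out e => out ++ [toDictA kind e]) out)
    []

-- ===== PORT B =====
-- row = {"kind": kind}; then conditionally add the three optional fields (truthy = not None, not "")
def rowB (kind : String) (rt ns bh : Option String) : List (String × String) :=
  let row := [("kind", kind)]
  let row := match rt with | some s => if s ≠ "" then row ++ [("ref_type", s)] else row | none => row
  let row := match ns with | some s => if s ≠ "" then row ++ [("namespace", s)] else row | none => row
  let row := match bh with | some s => if s ≠ "" then row ++ [("bindings_hash", s)] else row | none => row
  row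

-- flat.sort key: the 4-tuple (kind, rt or "", ns or "", bh or ""); Lex nesting = Python tuple comparison
def keyB (t : String × Option String × Option String × Option String) : List String :=
  [t.1, t.2.1.getD "", t.2.2.1.getD "", t.2.2.2.getD ""]

def capability_state_snapshot_py_alt (state : List (String × List (Option String × Option String × Option String))) : List (List (String × String)) :=
  let flat := state.flatMap (fun kv => kv.2.map (fun e => (kv.1, e)))
  let flat := PySem.List.sorted flat keyB
  flat.foldl (fun out t => out ++ [rowB t.1 t.2.1 t.2.2.1 t.2.2.2]) []

-- ===== PRECONDITION & SPEC =====
-- Pre_ only requires the association list to be a valid Python dict (no duplicate keys): every input the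
-- Python function can receive satisfies it, so it excludes no input A returns on.
def Pre_capability_state_snapshot_py (state : List (String × List (Option String × Option String × Option String))) : Prop :=
  (state.map Prod.fst).Nodup
instance (state : List (String × List (Option String × Option String × Option String))) : Decidable (Pre_capability_state_snapshot_py state) := by unfold Pre_capability_state_snapshot_py; infer_instance

def pvWitness_capability_state_snapshot_py : (List (String × List (Option String × Option String × Option String))) :=
  [("tool", [(some "search", none, some "abc")]), ("model", [(none, none, none), (some "x", some "ns", none)])]

def Spec_capability_state_snapshot_py (state : List (String × List (Option String × Option String × Option String))) (out : List (List (String × String))) : Prop := out = capability_state_snapshot_py_alt state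
instance (state : List (String × List (Option String × Option String × Option String))) (out : List (List (String × String))) : Decidable (Spec_capability_state_snapshot_py state out) := by unfold Spec_capability_state_snapshot_py; infer_instance

-- ===== CLAIM (what is proved, stated in full; the proofs are below) =====
def Claim_equal_capability_state_snapshot_py : Prop := ∀ (state : List (String × List (Option String × Option String × Option String))), Dom_capability_state_snapshot_py state → Pre_capability_state_snapshot_py state → Spec_capability_state_snapshot_py state (capability_state_snapshot_py state)

-- ===== LEMMAS AND PROOFS =====

-- instance bridges: the ports elaborate with core's List-lex instances, the order lemmas with
-- Mathlib's LinearOrder (List String); the sorted results coincide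
theorem pvSortedCongr {α : Type} (xs : List α) (key : α → List String) :
    @PySem.List.sorted α (List String) List.instLT (fun a b => a.decidableLT b) xs key false
      = @PySem.List.sorted α (List String) List.instLinearOrder.toLT LinearOrder.toDecidableLT xs key false := by
  rw [@PySem.List.sorted_eq_foldl_insertBy, @PySem.List.sorted_eq_foldl_insertBy]
  congr 1
  funext acc x
  congr 1
  funext a b
  exact decide_eq_decide.mpr Iff.rfl

theorem pvConsLeOfLt {a b : String} (h : a < b) (l l' : List String) :
    @LE.le _ List.instLinearOrder.toLE (a :: l) (b :: l') :=
  le_of_lt (show List.Lex (· < ·) (a :: l) (b :: l') from List.Lex.rel h)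

theorem pvConsLeCons (a : String) {l l' : List String}
    (h : @LE.le _ List.instLinearOrder.toLE l l') :
    @LE.le _ List.instLinearOrder.toLE (a :: l) (a :: l') := by
  rcases lt_or_eq_of_le h with hlt | heq
  · exact le_of_lt (show List.Lex (· < ·) (a :: l) (a :: l') from List.Lex.cons hlt)
  · rw [heq]

-- the emitted row is a function of the 4-tuple sort key alone (a field is kept iff its key component ≠ "")
def emitK (k : List String) : List (String × String) :=
  match k with
  | [kind, r, n, b] =>
    [("kind", kind)]
      ++ (if r = "" then [] else [("ref_type", r)])
      ++ (if n = "" then [] else [("namespace", n)])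
      ++ (if b = "" then [] else [("bindings_hash", b)])
  | _ => []

theorem toDictA_eq_emitK (kind : String) (e : Option String × Option String × Option String) :
    toDictA kind e = emitK (keyB (kind, e)) := by
  obtain ⟨rt, ns, bh⟩ := e
  cases rt <;> cases ns <;> cases bh <;>
    simp [toDictA, emitK, keyB, pvOptEntry]

theorem rowB_eq_emitK (kind : String) (rt ns bh : Option String) :
    rowB kind rt ns bh = emitK (keyB (kind, (rt, ns, bh))) := by
  cases rt <;> cases ns <;> cases bh <;>
    simp [rowB, emitK, keyB] <;> split_ifs <;> simp_all

-- state[k] in A: with nodup keys the dict lookup of a member pair's key returns its value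
theorem dict_lookup_of_nodup {ν : Type} (state : List (String × ν))
    (hnd : (state.map Prod.fst).Nodup) (kv : String × ν)
    (hm : kv ∈ state) (d : ν) : (PySem.Dict.mk state).getD kv.1 d = kv.2 := by
  induction state with
  | nil => cases hm
  | cons hd tl ih =>
    simp only [List.map_cons, List.nodup_cons] at hnd
    rcases List.mem_cons.mp hm with h | h
    · subst h
      simp [PySem.Dict.getD, PySem.Dict.get?]
    · have hne : hd.1 ≠ kv.1 := fun he => hnd.1 (he ▸ List.mem_map_of_mem h)
      have hih := ih hnd.2 h
      simp only [PySem.Dict.getD, PySem.Dict.get?] at hih ⊢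
      simp [hne, hih]

-- sorting the key list = taking the keys of the pair list sorted by key (needs nodup keys)
theorem sorted_keys_eq {ν : Type} (state : List (String × ν))
    (hnd : (state.map Prod.fst).Nodup) :
    PySem.List.sorted (state.map Prod.fst) (fun k => k)
      = (PySem.List.sorted state (fun kv => kv.1)).map Prod.fst := by
  apply PySem.List.sorted_eq_of_perm_of_pairwise_lt
  · exact ((PySem.List.sorted_perm state (fun kv => kv.1) false).map Prod.fst)
  · have hperm := (PySem.List.sorted_perm state (fun kv => kv.1) false).map Prod.fst
    have hnd' : ((PySem.List.sorted state (fun kv => kv.1)).map Prod.fst).Nodup :=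
      hnd.perm hperm.symm
    have hle := PySem.List.sorted_pairwise state (fun kv => kv.1)
    have hne : List.Pairwise (fun a b : String × ν => a.1 ≠ b.1)
        (PySem.List.sorted state (fun kv => kv.1)) := by
      rw [List.nodup_iff_pairwise_ne, List.pairwise_map] at hnd'
      exact hnd'
    rw [List.pairwise_map]
    exact (hle.and hne).imp (fun h => lt_of_le_of_ne h.1 h.2)

-- with nodup keys the key-sorted pair list is strictly increasing on keys
theorem S_pairwise_lt {ν : Type} (state : List (String × ν))
    (hnd : (state.map Prod.fst).Nodup) :
    List.Pairwise (fun a b : String × ν => a.1 < b.1) (PySem.List.sorted state (fun kv => kv.1)) := by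
  have hperm := (PySem.List.sorted_perm state (fun kv => kv.1) false).map Prod.fst
  have hnd' : ((PySem.List.sorted state (fun kv => kv.1)).map Prod.fst).Nodup :=
    hnd.perm hperm.symm
  have hle := PySem.List.sorted_pairwise state (fun kv => kv.1)
  rw [List.nodup_iff_pairwise_ne, List.pairwise_map] at hnd'
  exact (hle.and hnd').imp (fun h => lt_of_le_of_ne h.1 h.2)

-- both outputs are emitK mapped over a (·≤·)-sorted permutation of flat's keyB keys, hence equal
theorem main_eq (state : List (String × List (Option String × Option String × Option String)))
    (hnd : (state.map Prod.fst).Nodup) :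
    capability_state_snapshot_py state = capability_state_snapshot_py_alt state := by
  have hA : capability_state_snapshot_py state
      = (((PySem.List.sorted state (fun kv => kv.1)).flatMap
          (fun kv => (PySem.List.sorted kv.2 keyA).map (fun e => (kv.1, e)))).map keyB).map emitK := by
    simp only [capability_state_snapshot_py, PySem.List.foldl_append_singleton_eq_map,
      PySem.List.foldl_append_eq_flatMap, List.nil_append]
    rw [sorted_keys_eq state hnd, List.flatMap_map]
    rw [List.map_map, List.map_flatMap]
    rw [List.flatMap_def, List.flatMap_def]
    apply congrArg List.flatten
    apply List.map_congr_left
    intro kv hkv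
    rw [dict_lookup_of_nodup state hnd kv ((PySem.List.mem_sorted _ _ _ _).mp hkv)]
    rw [List.map_map]
    apply List.map_congr_left
    intro e _
    exact toDictA_eq_emitK kv.1 e
  have hB : capability_state_snapshot_py_alt state
      = ((PySem.List.sorted (state.flatMap (fun kv => kv.2.map (fun e => (kv.1, e)))) keyB).map keyB).map emitK := by
    simp only [capability_state_snapshot_py_alt, PySem.List.foldl_append_singleton_eq_map,
      List.nil_append, List.map_map]
    apply List.map_congr_left
    intro t _
    exact rowB_eq_emitK t.1 t.2.1 t.2.2.1 t.2.2.2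
  rw [hA, hB]
  apply congrArg (List.map emitK)
  apply PySem.List.eq_of_perm_of_pairwise_le_of_injective (key := fun x => x) Function.injective_id
  · apply List.Perm.map
    refine List.Perm.trans ?_ (PySem.List.sorted_perm _ keyB false).symm
    exact List.Perm.flatMap (PySem.List.sorted_perm state (fun kv => kv.1) false)
      (fun kv _ => (PySem.List.sorted_perm kv.2 keyA false).map _)
  · rw [List.pairwise_map, List.flatMap_def, List.pairwise_flatten]
    constructor
    · intro l hl
      rw [List.mem_map] at hl
      obtain ⟨kv, hkv, rfl⟩ := hl
      rw [List.pairwise_map, pvSortedCongr]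
      refine (PySem.List.sorted_pairwise kv.2 keyA).imp ?_
      intro e e' h
      exact pvConsLeCons kv.1 h
    · rw [List.pairwise_map]
      refine (S_pairwise_lt state hnd).imp ?_
      intro kv kv' h x hx y hy
      rw [List.mem_map] at hx hy
      obtain ⟨e, _, rfl⟩ := hx
      obtain ⟨e', _, rfl⟩ := hy
      exact pvConsLeOfLt h _ _
  · rw [List.pairwise_map, pvSortedCongr]
    exact PySem.List.sorted_pairwise (state.flatMap (fun kv => kv.2.map (fun e => (kv.1, e)))) keyB

-- ===== VERDICT (by name: the statement is the Claim_ definition above) =====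
theorem capability_state_snapshot_py_spec : Claim_equal_capability_state_snapshot_py := by
  intro state _ hpre
  unfold Spec_capability_state_snapshot_py
  exact main_eq state hpre
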